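-- pv_equiv track=rewrite | github.com/ChengyuSun/edGNN_entropy | entropy/countedge.py | count_poly_edge
-- ===== SOURCE A (Python) =====
-- import copy
--
-- def count_poly_edge(A, N,edge_adj):
--     n=0
--     a = copy.copy(A)
--     for i in range(N):
--         for j in range(i,N):
--             if a[i][j]>0:
--                 for k in range(j,N):
--                     if a[j][k]>0 and a[k][i] >0:
--                         n+=1
--                         edge_adj[i][j] += str(3)
--                         edge_adj[j][i] += str(3)
--                         edge_adj[j][k] += str(3)
--                         edge_adj[k][j] += str(3)
--                         edge_adj[i][k] += str(3)
--                         edge_adj[k][i] += str(3)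
--     return n
-- ===== SOURCE B (Python) =====
-- def count_poly_edge(A, N, edge_adj):
--     # Hinge-pair strategy: precompute successor/predecessor vertex sets, then for each
--     # pair (i, k) with a closing edge A[k][i] > 0 count the middle vertices j as a set
--     # intersection.  Performs the same in-place '3'-appends to edge_adj per triangle.
--     succ = [set(m for m in range(v, N) if A[v][m] > 0) for v in range(N)]
--     pred = [set(m for m in range(v + 1) if A[m][v] > 0) for v in range(N)]
--     n = 0
--     for i in range(N):
--         for k in range(i, N):
--             if A[k][i] > 0:
--                 common = succ[i] & pred[k]
--                 n += len(common)
--                 for j in common: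
--                     for x, y in ((i, j), (j, i), (j, k), (k, j), (i, k), (k, i)):
--                         edge_adj[x][y] += '3'
--     return n
-- ===== Notes on version B (the rewrite author's own statement) =====
-- stated objective: alternative
-- what changed: B counts triangles by a hinge-pair strategy: it stages successor/predecessor vertex sets, then scans pairs (i,k), tests the closing edge A[k][i] first, and counts the middle vertices j of each pair as a set intersection, instead of A's triple nested index scan that tests A[i][j] then A[j][k] per triple; the dead copy.copy(A) is dropped.
-- outside the precondition, e.g. on count_poly_edge([[0]], 1, []): A returns 0, B returns 0
import Mathlib
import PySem

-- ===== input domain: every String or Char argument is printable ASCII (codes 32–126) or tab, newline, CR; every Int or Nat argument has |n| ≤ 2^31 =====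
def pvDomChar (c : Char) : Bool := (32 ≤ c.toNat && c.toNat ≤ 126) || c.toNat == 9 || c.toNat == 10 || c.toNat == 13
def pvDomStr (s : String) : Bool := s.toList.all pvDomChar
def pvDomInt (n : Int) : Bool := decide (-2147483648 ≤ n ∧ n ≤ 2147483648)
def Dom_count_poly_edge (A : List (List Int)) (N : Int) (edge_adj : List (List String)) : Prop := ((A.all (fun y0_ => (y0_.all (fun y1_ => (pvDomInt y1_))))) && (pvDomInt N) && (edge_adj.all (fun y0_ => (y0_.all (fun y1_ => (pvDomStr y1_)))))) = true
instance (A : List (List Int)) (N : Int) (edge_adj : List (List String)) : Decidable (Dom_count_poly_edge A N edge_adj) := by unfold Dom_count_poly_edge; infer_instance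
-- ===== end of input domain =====

-- B counts triangles by a hinge-pair strategy (stage the successor/predecessor vertex
-- sets, then for each pair (i,k) whose closing edge A[k][i] exists count the middle
-- vertices by set intersection) instead of A's triple nested index scan; the equivalence
-- proved here is about the RETURN value n only — both Pythons also append '3' to the
-- same edge_adj cells in place (B performs the same mutation).

-- A[x][y] (exact within Pre_, where every index read is in range and nonnegative)
def pvGet (A : List (List Int)) (x y : Int) : Int :=
  PySem.List.pyGetD (PySem.List.pyGetD A x []) y 0

-- ===== PORT A =====
def count_poly_edge (A : List (List Int)) (N : Int) (edge_adj : List (List String)) : Int :=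
  -- a = copy.copy(A) is a shallow copy read exactly like A; the edge_adj writes do not affect n
  (PySem.List.pyRange 0 N 1).foldl (fun n i =>
    (PySem.List.pyRange i N 1).foldl (fun n j =>
      if pvGet A i j > 0 then
        (PySem.List.pyRange j N 1).foldl (fun n k =>
          if pvGet A j k > 0 ∧ pvGet A k i > 0 then n + 1 else n) n
      else n) n) 0

-- ===== PORT B =====
def count_poly_edge_alt (A : List (List Int)) (N : Int) (edge_adj : List (List String)) : Int :=
  let succ := (PySem.List.pyRange 0 N 1).map (fun v =>
    PySem.Set.ofList ((PySem.List.pyRange v N 1).filter (fun m => decide (pvGet A v m > 0))))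
  let pred := (PySem.List.pyRange 0 N 1).map (fun v =>
    PySem.Set.ofList ((PySem.List.pyRange 0 (v + 1) 1).filter (fun m => decide (pvGet A m v > 0))))
  (PySem.List.pyRange 0 N 1).foldl (fun n i =>
    (PySem.List.pyRange i N 1).foldl (fun n k =>
      if pvGet A k i > 0 then
        n + PySem.Set.len (PySem.Set.inter (PySem.List.pyGetD succ i PySem.Set.empty)
                                           (PySem.List.pyGetD pred k PySem.Set.empty))
      else n) n) 0

-- ===== PRECONDITION & SPEC =====
-- Pre_ excludes exactly the shapes on which the Python can hit an IndexError: the first N rows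
-- of A and of edge_adj must exist and have length ≥ N. This is slightly narrower than A's
-- raising set: when the matrix contains no triangle, edge_adj is never indexed, so A still
-- returns 0 on a too-small edge_adj (see cites in claim.json).
def Pre_count_poly_edge (A : List (List Int)) (N : Int) (edge_adj : List (List String)) : Prop :=
  N ≤ (A.length : Int) ∧ N ≤ (edge_adj.length : Int) ∧
  (∀ r ∈ A.take N.toNat, N ≤ (r.length : Int)) ∧
  (∀ r ∈ edge_adj.take N.toNat, N ≤ (r.length : Int))
instance (A : List (List Int)) (N : Int) (edge_adj : List (List String)) : Decidable (Pre_count_poly_edge A N edge_adj) := by unfold Pre_count_poly_edge; infer_instance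

def pvWitness_count_poly_edge : List (List Int) × Int × List (List String) :=
  ([[1, 1], [0, 1]], 2, [["", ""], ["", ""]])

def Spec_count_poly_edge (A : List (List Int)) (N : Int) (edge_adj : List (List String)) (out : Int) : Prop := out = count_poly_edge_alt A N edge_adj
instance (A : List (List Int)) (N : Int) (edge_adj : List (List String)) (out : Int) : Decidable (Spec_count_poly_edge A N edge_adj out) := by unfold Spec_count_poly_edge; infer_instance

-- ===== CLAIM (what is proved, stated in full; the proofs are below) =====
def Claim_equal_count_poly_edge : Prop := ∀ (A : List (List Int)) (N : Int) (edge_adj : List (List String)), Dom_count_poly_edge A N edge_adj → Pre_count_poly_edge A N edge_adj → Spec_count_poly_edge A N edge_adj (count_poly_edge A N edge_adj)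

-- ===== LEMMAS AND PROOFS =====

-- a guarded accumulating fold is the sum of its guarded contributions
theorem foldl_guard_add (l : List Int) (p : Int → Prop) [DecidablePred p] (g : Int → Int)
    (n : Int) :
    l.foldl (fun n x => if p x then n + g x else n) n
      = n + (l.map (fun x => if p x then g x else 0)).sum := by
  induction l generalizing n with
  | nil => simp
  | cons a l ih =>
    simp only [List.foldl_cons, List.map_cons, List.sum_cons]
    by_cases h : p a
    · rw [if_pos h, if_pos h, ih]; ring
    · rw [if_neg h, if_neg h, ih]; ring

-- exchange of two finite sums over lists
theorem sum_swap (l1 l2 : List Int) (f : Int → Int → Int) :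
    (l1.map (fun j => (l2.map (fun k => f j k)).sum)).sum
      = (l2.map (fun k => (l1.map (fun j => f j k)).sum)).sum := by
  induction l1 with
  | nil => simp [List.map_const']
  | cons a l ih =>
    simp only [List.map_cons, List.sum_cons, ih]
    rw [← PySem.List.sum_map_add_int]

-- a sum over range(j, N) equals the sum over range(i, N) of terms guarded by j ≤ k
theorem sum_range_extend (i j N : Int) (hij : i ≤ j) (hjN : j ≤ N) (f : Int → Int) :
    ((PySem.List.pyRange j N 1).map f).sum
      = ((PySem.List.pyRange i N 1).map (fun k => if j ≤ k then f k else 0)).sum := by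
  rw [PySem.List.pyRange_one_append i j N hij hjN, List.map_append, List.sum_append]
  have h1 : (((PySem.List.pyRange i j 1).map (fun k => if j ≤ k then f k else 0))).sum = 0 := by
    apply List.sum_eq_zero
    intro x hx
    simp only [List.mem_map] at hx
    obtain ⟨k, hk, rfl⟩ := hx
    have := (PySem.List.mem_pyRange_one.mp hk).2
    rw [if_neg (by omega)]
  have h2 : ((PySem.List.pyRange j N 1).map (fun k => if j ≤ k then f k else 0))
      = (PySem.List.pyRange j N 1).map f := by
    apply List.map_congr_left
    intro k hk
    have := (PySem.List.mem_pyRange_one.mp hk).1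
    rw [if_pos this]
  rw [h1, h2, zero_add]

-- core identity, for a fixed first vertex i: A's j-then-k scan equals B's hinge-pair sum
theorem hinge_eq (A : List (List Int)) (N i : Int) (h0 : 0 ≤ i) :
    ((PySem.List.pyRange i N 1).map (fun j =>
      if pvGet A i j > 0 then
        ((PySem.List.pyRange j N 1).map (fun k =>
          if pvGet A j k > 0 ∧ pvGet A k i > 0 then (1 : Int) else 0)).sum
      else 0)).sum
    = ((PySem.List.pyRange i N 1).map (fun k =>
        if pvGet A k i > 0 then
          PySem.Set.len (PySem.Set.inter
            (PySem.Set.ofList ((PySem.List.pyRange i N 1).filter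
              (fun m => decide (pvGet A i m > 0))))
            (PySem.Set.ofList ((PySem.List.pyRange 0 (k + 1) 1).filter
              (fun m => decide (pvGet A m k > 0)))))
        else 0)).sum := by
  have hstep1 : ((PySem.List.pyRange i N 1).map (fun j =>
      if pvGet A i j > 0 then
        ((PySem.List.pyRange j N 1).map (fun k =>
          if pvGet A j k > 0 ∧ pvGet A k i > 0 then (1 : Int) else 0)).sum
      else 0)).sum
    = ((PySem.List.pyRange i N 1).map (fun j =>
        ((PySem.List.pyRange i N 1).map (fun k =>
          if pvGet A i j > 0 ∧ j ≤ k ∧ pvGet A j k > 0 ∧ pvGet A k i > 0 then (1 : Int)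
          else 0)).sum)).sum := by
    apply congrArg
    apply List.map_congr_left
    intro j hj
    obtain ⟨hij, hjN⟩ := PySem.List.mem_pyRange_one.mp hj
    by_cases hp : pvGet A i j > 0
    · rw [if_pos hp, sum_range_extend i j N hij (by omega)]
      apply congrArg
      apply List.map_congr_left
      intro k _
      by_cases hjk : j ≤ k
      · rw [if_pos hjk]
        by_cases hq : pvGet A j k > 0 ∧ pvGet A k i > 0
        · rw [if_pos hq, if_pos ⟨hp, hjk, hq⟩]
        · rw [if_neg hq, if_neg (by tauto)]
      · rw [if_neg hjk, if_neg (by tauto)]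
    · rw [if_neg hp]
      symm
      apply List.sum_eq_zero
      intro x hx
      simp only [List.mem_map] at hx
      obtain ⟨k, _, rfl⟩ := hx
      rw [if_neg (by tauto)]
  rw [hstep1, sum_swap]
  apply congrArg
  apply List.map_congr_left
  intro k hk
  obtain ⟨hik, hkN⟩ := PySem.List.mem_pyRange_one.mp hk
  by_cases hc : pvGet A k i > 0
  · rw [if_pos hc]
    -- both sides count the middle vertices j
    have hnodup := PySem.List.nodup_pyRange_one i N
    rw [PySem.Set.ofList_eq_self_of_nodup _ (List.Nodup.filter _ hnodup)]
    show _ = ((((PySem.List.pyRange i N 1).filter _).filter _).length : Int)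
    rw [List.filter_filter, ← List.countP_eq_length_filter]
    have : ((PySem.List.pyRange i N 1).map (fun j =>
        if pvGet A i j > 0 ∧ j ≤ k ∧ pvGet A j k > 0 ∧ pvGet A k i > 0 then (1 : Int) else 0)).sum
      = (((PySem.List.pyRange i N 1).countP
          (fun j => decide (pvGet A i j > 0 ∧ j ≤ k ∧ pvGet A j k > 0 ∧ pvGet A k i > 0)) : Nat) : Int) := by
      rw [← PySem.List.sum_map_ite_one_zero]
      apply congrArg
      apply List.map_congr_left
      intro j _
      simp
    rw [this]
    apply congrArg
    apply List.countP_congr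
    intro j hj
    obtain ⟨hij, hjN⟩ := PySem.List.mem_pyRange_one.mp hj
    have hmem : (PySem.Set.ofList ((PySem.List.pyRange 0 (k + 1) 1).filter
        (fun m => decide (pvGet A m k > 0)))).contains j
        = decide (j ≤ k ∧ pvGet A j k > 0) := by
      rw [Bool.eq_iff_iff, PySem.Set.contains_iff, PySem.Set.mem_ofList, List.mem_filter,
        PySem.List.mem_pyRange_one]
      simp only [decide_eq_true_eq]
      constructor
      · rintro ⟨⟨_, h1⟩, h2⟩; exact ⟨by omega, h2⟩
      · rintro ⟨h1, h2⟩; exact ⟨⟨by omega, by omega⟩, h2⟩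
    rw [hmem, Bool.eq_iff_iff]
    simp only [Bool.and_eq_true, decide_eq_true_eq]
    tauto
  · rw [if_neg hc]
    apply List.sum_eq_zero
    intro x hx
    simp only [List.mem_map] at hx
    obtain ⟨j, _, rfl⟩ := hx
    rw [if_neg (by tauto)]

theorem count_poly_edge_spec : Claim_equal_count_poly_edge := by
  intro A N edge_adj _ _
  unfold Spec_count_poly_edge
  simp only [count_poly_edge, count_poly_edge_alt]
  apply PySem.List.foldl_congr_mem
  intro n i hi
  obtain ⟨hi0, hiN⟩ := PySem.List.mem_pyRange_one.mp hi
  -- A's body for vertex i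
  have hA : (PySem.List.pyRange i N 1).foldl (fun n j =>
      if pvGet A i j > 0 then
        (PySem.List.pyRange j N 1).foldl (fun n k =>
          if pvGet A j k > 0 ∧ pvGet A k i > 0 then n + 1 else n) n
      else n) n
    = n + ((PySem.List.pyRange i N 1).map (fun j =>
        if pvGet A i j > 0 then
          ((PySem.List.pyRange j N 1).map (fun k =>
            if pvGet A j k > 0 ∧ pvGet A k i > 0 then (1 : Int) else 0)).sum
        else 0)).sum := by
    have hfun : (fun (n j : Int) =>
        if pvGet A i j > 0 then
          (PySem.List.pyRange j N 1).foldl (fun n k =>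
            if pvGet A j k > 0 ∧ pvGet A k i > 0 then n + 1 else n) n
        else n)
      = (fun (n j : Int) =>
          if pvGet A i j > 0 then
            n + ((PySem.List.pyRange j N 1).map (fun k =>
              if pvGet A j k > 0 ∧ pvGet A k i > 0 then (1 : Int) else 0)).sum
          else n) := by
      funext n j
      rw [foldl_guard_add (PySem.List.pyRange j N 1)
        (fun k => pvGet A j k > 0 ∧ pvGet A k i > 0) (fun _ => 1) n]
    rw [hfun, foldl_guard_add]
  -- B's body for vertex i
  have hB : (PySem.List.pyRange i N 1).foldl (fun n k =>
      if pvGet A k i > 0 then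
        n + PySem.Set.len (PySem.Set.inter
          (PySem.List.pyGetD ((PySem.List.pyRange 0 N 1).map (fun v =>
            PySem.Set.ofList ((PySem.List.pyRange v N 1).filter
              (fun m => decide (pvGet A v m > 0))))) i PySem.Set.empty)
          (PySem.List.pyGetD ((PySem.List.pyRange 0 N 1).map (fun v =>
            PySem.Set.ofList ((PySem.List.pyRange 0 (v + 1) 1).filter
              (fun m => decide (pvGet A m v > 0))))) k PySem.Set.empty))
      else n) n
    = n + ((PySem.List.pyRange i N 1).map (fun k =>
        if pvGet A k i > 0 then
          PySem.Set.len (PySem.Set.inter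
            (PySem.Set.ofList ((PySem.List.pyRange i N 1).filter
              (fun m => decide (pvGet A i m > 0))))
            (PySem.Set.ofList ((PySem.List.pyRange 0 (k + 1) 1).filter
              (fun m => decide (pvGet A m k > 0)))))
        else 0)).sum := by
    rw [PySem.List.foldl_congr_mem _ _ (fun n k =>
        if pvGet A k i > 0 then
          n + PySem.Set.len (PySem.Set.inter
            (PySem.Set.ofList ((PySem.List.pyRange i N 1).filter
              (fun m => decide (pvGet A i m > 0))))
            (PySem.Set.ofList ((PySem.List.pyRange 0 (k + 1) 1).filter
              (fun m => decide (pvGet A m k > 0)))))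
        else n) n ?_]
    · exact foldl_guard_add _ _ _ n
    · intro m k hk
      obtain ⟨hik, hkN⟩ := PySem.List.mem_pyRange_one.mp hk
      rw [PySem.List.pyGetD_map_pyRange_of_nonneg _ N i _ hi0 hiN,
        PySem.List.pyGetD_map_pyRange_of_nonneg _ N k _ (by omega) hkN]
  rw [hA, hB, hinge_eq A N i hi0]
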